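-- pv_equiv track=rewrite | github.com/jokh0108/study-algorithm | practice/baekjoon/baekjoon-1759.py | solution
-- ===== SOURCE A (Python) =====
-- from itertools import combinations
--
-- MIN_VOWEL_NUMBER = 1
--
-- MIN_CONSONANATS_NUMBER = 2
--
-- def solution(L, chars):
--     passwords = []
--     for combination in combinations(chars, L):
--         vowels = [char for char in combination if char in {"a", "e", "i", "o", "u"}]
--         consonants = [
--             char for char in combination if char not in {"a", "e", "i", "o", "u"}
--         ]
--         if len(vowels) < MIN_VOWEL_NUMBER:
--             continue
--         if len(consonants) < MIN_CONSONANATS_NUMBER: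
--             continue
--         passwords.append("".join(sorted(vowels + consonants)))
--     return sorted(passwords)
-- ===== SOURCE B (Python) =====
-- MIN_VOWEL_NUMBER = 1
--
-- MIN_CONSONANATS_NUMBER = 2
--
-- def solution(L, chars):
--     vowels = {"a", "e", "i", "o", "u"}
--     sorted_chars = sorted(chars)
--     result = []
--
--     def backtrack(start, current, n_vowels, n_consonants):
--         if len(current) == L:
--             if n_vowels >= MIN_VOWEL_NUMBER and n_consonants >= MIN_CONSONANATS_NUMBER:
--                 result.append("".join(current))
--             return
--         for i in range(start, len(sorted_chars)):
--             ch = sorted_chars[i]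
--             current.append(ch)
--             if ch in vowels:
--                 backtrack(i + 1, current, n_vowels + 1, n_consonants)
--             else:
--                 backtrack(i + 1, current, n_vowels, n_consonants + 1)
--             current.pop()
--
--     backtrack(0, [], 0, 0)
--     return sorted(result)
-- ===== Notes on version B (the rewrite author's own statement) =====
-- stated objective: alternative
-- what changed: B sorts chars once and enumerates combinations by recursive backtracking over the sorted list with threaded vowel/consonant counters, so each password is emitted already internally sorted and the per-combination sorted() call disappears.
import Mathlib
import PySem

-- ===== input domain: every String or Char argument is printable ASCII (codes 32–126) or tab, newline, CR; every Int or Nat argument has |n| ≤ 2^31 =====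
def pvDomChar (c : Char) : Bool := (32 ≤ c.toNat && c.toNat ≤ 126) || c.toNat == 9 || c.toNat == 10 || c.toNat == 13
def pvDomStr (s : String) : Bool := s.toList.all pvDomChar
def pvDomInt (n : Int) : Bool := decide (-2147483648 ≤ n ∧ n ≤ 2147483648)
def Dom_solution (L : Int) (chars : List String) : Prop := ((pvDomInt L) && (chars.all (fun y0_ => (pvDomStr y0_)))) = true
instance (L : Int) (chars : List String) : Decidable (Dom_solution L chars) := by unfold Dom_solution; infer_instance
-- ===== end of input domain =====

-- B sorts the characters once and enumerates combinations by backtracking with threaded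
-- vowel/consonant counters, so each emitted password is already internally sorted
-- (no per-combination sort); objective: alternative decomposition.

-- ===== PORT A =====
-- membership in the Python set literal {"a","e","i","o","u"}
def isVowel (s : String) : Bool := ["a", "e", "i", "o", "u"].contains s

def solution (L : Int) (chars : List String) : List String :=
  let passwords : List String :=
    (PySem.List.combinations chars L.toNat).foldl (fun acc combination =>
      let vowels := combination.filter (fun ch => isVowel ch)
      let consonants := combination.filter (fun ch => !isVowel ch)
      if vowels.length < 1 then acc
      else if consonants.length < 2 then acc
      else acc ++ [PySem.Str.join "" (PySem.List.sorted (vowels ++ consonants) (fun x => x) false)]) []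
  PySem.List.sorted passwords (fun x => x) false

-- ===== PORT B =====
-- backtrack(start, current, n_vowels, n_consonants) of Source B; the suffix `rest` plays the
-- role of the index range start..len(sorted_chars)
def btAux (L : Int) : List String → List String → Int → Int → List String
  | [], cur, v, c =>
    if (cur.length : Int) = L then
      (if 1 ≤ v ∧ 2 ≤ c then [PySem.Str.join "" cur] else [])
    else []
  | ch :: rs, cur, v, c =>
    if (cur.length : Int) = L then
      (if 1 ≤ v ∧ 2 ≤ c then [PySem.Str.join "" cur] else [])
    else
      (if isVowel ch then btAux L rs (cur ++ [ch]) (v + 1) c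
       else btAux L rs (cur ++ [ch]) v (c + 1)) ++ btAux L rs cur v c

def solution_alt (L : Int) (chars : List String) : List String :=
  PySem.List.sorted (btAux L (PySem.List.sorted chars (fun x => x) false) [] 0 0) (fun x => x) false

-- ===== PRECONDITION & SPEC =====
-- Pre_ excludes only L < 0, on which Python's combinations(chars, L) raises ValueError.
def Pre_solution (L : Int) (chars : List String) : Prop := 0 ≤ L
instance (L : Int) (chars : List String) : Decidable (Pre_solution L chars) := by unfold Pre_solution; infer_instance
def pvWitness_solution : Int × List String := (3, ["a", "t", "c", "i", "s", "w"])

def Spec_solution (L : Int) (chars : List String) (out : List String) : Prop := out = solution_alt L chars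
instance (L : Int) (chars : List String) (out : List String) : Decidable (Spec_solution L chars out) := by unfold Spec_solution; infer_instance

-- ===== CLAIM (what is proved, stated in full; the proofs are below) =====
def Claim_equal_solution : Prop := ∀ (L : Int) (chars : List String), Dom_solution L chars → Pre_solution L chars → Spec_solution L chars (solution L chars)

-- ===== LEMMAS AND PROOFS =====

-- the common "combination -> optional password" function both result lists are built from
def pwOpt (t : List String) : Option String :=
  if 1 ≤ ((t.filter isVowel).length : Int) ∧ 2 ≤ ((t.filter (fun s => !isVowel s)).length : Int)
  then some (PySem.Str.join "" (PySem.List.sorted t (fun x => x) false)) else none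

lemma pwOpt_perm {a b : List String} (h : a.Perm b) : pwOpt a = pwOpt b := by
  unfold pwOpt
  rw [(h.filter isVowel).length_eq, (h.filter (fun s => !isVowel s)).length_eq,
      PySem.List.sorted_eq_sorted_of_perm a b (fun x => x) (fun _ _ h => h) h]

lemma btAux_base (L : Int) (rest cur : List String) (v c : Int) (hL : (cur.length : Int) = L) :
    btAux L rest cur v c =
      ((PySem.List.combinations rest 0).filter
        (fun t => decide (1 ≤ v + ((t.filter isVowel).length : Int) ∧
                           2 ≤ c + ((t.filter (fun s => !isVowel s)).length : Int)))).map
        (fun t => PySem.Str.join "" (cur ++ t)) := by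
  have key : (if 1 ≤ v ∧ 2 ≤ c then [PySem.Str.join "" cur] else []) =
      (([[]] : List (List String)).filter
        (fun t => decide (1 ≤ v + ((t.filter isVowel).length : Int) ∧
                           2 ≤ c + ((t.filter (fun s => !isVowel s) ).length : Int)))).map
        (fun t => PySem.Str.join "" (cur ++ t)) := by
    by_cases h : 1 ≤ v ∧ 2 ≤ c
    · rw [if_pos h]
      simp [List.filter_cons, h.1, h.2]
    · rw [if_neg h]
      simp only [List.filter_cons, List.filter_nil, List.length_nil, Nat.cast_zero, add_zero]
      rw [decide_eq_false h]
      simp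
  cases rest with
  | nil => rw [btAux, if_pos hL, PySem.List.combinations_zero]; exact key
  | cons ch rs => rw [btAux, if_pos hL, PySem.List.combinations_zero]; exact key

lemma btAux_eq (L : Int) : ∀ (rest cur : List String) (v c : Int) (k : Nat),
    (cur.length : Int) + k = L →
    btAux L rest cur v c =
      ((PySem.List.combinations rest k).filter
        (fun t => decide (1 ≤ v + ((t.filter isVowel).length : Int) ∧
                           2 ≤ c + ((t.filter (fun s => !isVowel s)).length : Int)))).map
        (fun t => PySem.Str.join "" (cur ++ t)) := by
  intro rest
  induction rest with
  | nil =>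
    intro cur v c k hk
    match k with
    | 0 => exact btAux_base L [] cur v c (by omega)
    | k + 1 =>
      have : (cur.length : Int) ≠ L := by omega
      rw [btAux]
      simp [this, PySem.List.combinations_nil_succ]
  | cons ch rs ih =>
    intro cur v c k hk
    match k with
    | 0 => exact btAux_base L (ch :: rs) cur v c (by omega)
    | k + 1 =>
      have hne : (cur.length : Int) ≠ L := by omega
      rw [btAux, if_neg hne, PySem.List.combinations_cons_succ, List.filter_append,
          List.map_append, List.filter_map, List.map_map]
      have hlen : ((cur ++ [ch]).length : Int) + k = L := by
        simp [List.length_append]; omega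
      have hfun : ((fun t => PySem.Str.join "" (cur ++ t)) ∘ fun t => ch :: t) =
          (fun t => PySem.Str.join "" (cur ++ [ch] ++ t)) := by
        funext t; simp
      rw [hfun, ih cur v c (k + 1) hk]
      congr 1
      by_cases hv : isVowel ch
      · rw [if_pos hv, ih (cur ++ [ch]) (v + 1) c k hlen]
        congr 1
        apply List.filter_congr
        intro t _
        have h1 : (ch :: t).filter isVowel = ch :: t.filter isVowel := by
          simp [List.filter_cons, hv]
        have h2 : (ch :: t).filter (fun s => !isVowel s) = t.filter (fun s => !isVowel s) := by
          simp [List.filter_cons, hv]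
        simp only [Function.comp_apply, h1, h2, List.length_cons, decide_eq_decide]
        push_cast
        omega
      · have hvb : isVowel ch = false := by simpa using hv
        rw [if_neg hv, ih (cur ++ [ch]) v (c + 1) k hlen]
        congr 1
        apply List.filter_congr
        intro t _
        have h1 : (ch :: t).filter isVowel = t.filter isVowel := by
          simp [List.filter_cons, hvb]
        have h2 : (ch :: t).filter (fun s => !isVowel s) = ch :: t.filter (fun s => !isVowel s) := by
          simp [List.filter_cons, hvb]
        simp only [Function.comp_apply, h1, h2, List.length_cons, decide_eq_decide]
        push_cast
        omega

-- mapping a permutation-invariant function over the combinations of a permuted list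
-- yields a permutation of the mapped combinations
lemma comb_map_perm {β : Type} : ∀ {xs ys : List String}, xs.Perm ys →
    ∀ (g : List String → β), (∀ a b, a.Perm b → g a = g b) →
    ∀ k : Nat, ((PySem.List.combinations xs k).map g).Perm ((PySem.List.combinations ys k).map g) := by
  intro xs ys h
  induction h with
  | nil => intro g hg k; exact List.Perm.refl _
  | cons x h ih =>
    intro g hg k
    match k with
    | 0 => simp [PySem.List.combinations_zero]
    | k + 1 =>
      rw [PySem.List.combinations_cons_succ, PySem.List.combinations_cons_succ,
          List.map_append, List.map_append, List.map_map, List.map_map]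
      exact (ih (fun t => g (x :: t)) (fun a b hab => hg _ _ (hab.cons x)) k).append (ih g hg (k + 1))
  | swap x y l =>
    intro g hg k
    match k with
    | 0 => simp [PySem.List.combinations_zero]
    | 1 =>
      rw [PySem.List.combinations_one, PySem.List.combinations_one]
      simp only [List.map_cons]
      exact List.Perm.swap _ _ _
    | k + 2 =>
      simp only [PySem.List.combinations_cons_succ, List.map_append, List.map_map]
      have e1 : List.map (g ∘ (fun c => y :: c) ∘ fun c => x :: c) (PySem.List.combinations l k) =
          List.map (g ∘ (fun c => x :: c) ∘ fun c => y :: c) (PySem.List.combinations l k) := by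
        apply List.map_congr_left; intro t _
        simp only [Function.comp_apply]
        exact hg _ _ (List.Perm.swap _ _ _)
      rw [e1, List.append_assoc, List.append_assoc]
      exact List.Perm.append_left _ (by
        rw [← List.append_assoc, ← List.append_assoc]
        exact List.Perm.append_right _ List.perm_append_comm)
  | trans h1 h2 ih1 ih2 =>
    intro g hg k
    exact (ih1 g hg k).trans (ih2 g hg k)

-- '(xs.filter p).map f' is the reduceOption of a map, given a pointwise description
lemma filter_map_eq_reduceOption {α β : Type} (p : α → Bool) (f : α → β) (g : α → Option β) :
    ∀ xs : List α, (∀ x ∈ xs, g x = if p x then some (f x) else none) →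
    (xs.filter p).map f = (xs.map g).reduceOption := by
  intro xs
  induction xs with
  | nil => intro _; simp
  | cons x t ih =>
    intro h
    have hx := h x (by simp)
    have ht := ih (fun y hy => h y (by simp [hy]))
    by_cases hp : p x
    · simp [List.filter_cons, hp, hx, List.reduceOption_cons_of_some, ht]
    · simp [List.filter_cons, hp, hx, ht, List.reduceOption]

-- A's accumulation loop produces the reduceOption of pwOpt over the combinations
lemma A_list_eq : ∀ (combos : List (List String)) (acc : List String),
    (combos.foldl (fun acc combination =>
      let vowels := combination.filter (fun ch => isVowel ch)
      let consonants := combination.filter (fun ch => !isVowel ch)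
      if vowels.length < 1 then acc
      else if consonants.length < 2 then acc
      else acc ++ [PySem.Str.join "" (PySem.List.sorted (vowels ++ consonants) (fun x => x) false)]) acc) =
    acc ++ (combos.map pwOpt).reduceOption := by
  have hstep : ∀ (t : List String) (acc : List String),
      (let vowels := t.filter (fun ch => isVowel ch)
       let consonants := t.filter (fun ch => !isVowel ch)
       if vowels.length < 1 then acc
       else if consonants.length < 2 then acc
       else acc ++ [PySem.Str.join "" (PySem.List.sorted (vowels ++ consonants) (fun x => x) false)]) =
      (match pwOpt t with | some s => acc ++ [s] | none => acc) := by
    intro t acc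
    have hperm : (t.filter isVowel ++ t.filter (fun s => !isVowel s)).Perm t :=
      List.filter_append_perm _ t
    have hsort : PySem.List.sorted
        (t.filter isVowel ++ t.filter (fun s => !isVowel s)) (fun x => x) false =
        PySem.List.sorted t (fun x => x) false :=
      PySem.List.sorted_eq_sorted_of_perm _ _ (fun x => x) (fun _ _ h => h) hperm
    show (if (t.filter isVowel).length < 1 then acc
          else if (t.filter (fun s => !isVowel s)).length < 2 then acc
          else acc ++ [PySem.Str.join "" (PySem.List.sorted
            (t.filter isVowel ++ t.filter (fun s => !isVowel s)) (fun x => x) false)]) = _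
    rw [hsort]
    unfold pwOpt
    by_cases h : 1 ≤ ((t.filter isVowel).length : Int) ∧ 2 ≤ ((t.filter (fun s => !isVowel s)).length : Int)
    · have h1 : ¬ (t.filter isVowel).length < 1 := by
        have := h.1; omega
      have h2 : ¬ (t.filter (fun s => !isVowel s)).length < 2 := by
        have := h.2; omega
      rw [if_neg h1, if_neg h2, if_pos h]
    · rw [if_neg h]
      by_cases h1 : (t.filter isVowel).length < 1
      · rw [if_pos h1]
      · rw [if_neg h1]
        have h2 : (t.filter (fun s => !isVowel s)).length < 2 := by omega
        rw [if_pos h2]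
  intro combos
  induction combos with
  | nil => intro acc; simp
  | cons x t ih =>
    intro acc
    rw [List.foldl_cons, ih, hstep x acc, List.map_cons]
    cases hx : pwOpt x
    · simp [List.reduceOption_cons_of_none]
    · simp [List.reduceOption_cons_of_some]

-- ===== VERDICT (by name: the statement is the Claim_ definition above) =====
theorem solution_spec : Claim_equal_solution := by
  intro L chars _ hL
  unfold Spec_solution solution solution_alt
  have hk : ((([] : List String)).length : Int) + L.toNat = L := by
    simp [Int.toNat_of_nonneg hL]
  rw [btAux_eq L _ [] 0 0 L.toNat hk, A_list_eq, List.nil_append]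
  have hB : ((PySem.List.combinations (PySem.List.sorted chars (fun x => x) false) L.toNat).filter
        (fun t => decide (1 ≤ (0 : Int) + ((t.filter isVowel).length : Int) ∧
                           2 ≤ (0 : Int) + ((t.filter (fun s => !isVowel s)).length : Int)))).map
        (fun t => PySem.Str.join "" (([] : List String) ++ t)) =
      ((PySem.List.combinations (PySem.List.sorted chars (fun x => x) false) L.toNat).map pwOpt).reduceOption := by
    apply filter_map_eq_reduceOption
    intro t ht
    have hsub : t.Sublist (PySem.List.sorted chars (fun x => x) false) :=
      PySem.List.sublist_of_mem_combinations ht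
    have hpw : t.Pairwise (fun a b : String => a ≤ b) :=
      (PySem.List.sorted_pairwise chars (fun x => x)).sublist hsub
    have hst : PySem.List.sorted t (fun x => x) false = t :=
      PySem.List.sorted_eq_self_of_pairwise t (fun x => x) hpw
    simp only [pwOpt, hst, List.nil_append, zero_add]
    by_cases h1 : 1 ≤ ((t.filter isVowel).length : Int) ∧ 2 ≤ ((t.filter (fun s => !isVowel s)).length : Int)
    · simp [h1]
    · simp [h1]
  rw [hB]
  apply PySem.List.sorted_eq_sorted_of_perm _ _ (fun x => x) (fun _ _ h => h)
  exact List.Perm.filterMap id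
    (comb_map_perm ((PySem.List.sorted_perm chars (fun x => x) false).symm) pwOpt
      (fun a b h => pwOpt_perm h) L.toNat)
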